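-- pv_equiv track=rewrite | github.com/IDEA-Research-Group/conformancechecking4spark | conformancechecking4spark/heuristics/utils.py | sum_dif_dict
-- ===== SOURCE A (Python) =====
-- def sum_dif_dict(dict1, dict2):
--     used_variables = []
--     total = 0
--     for s in dict1.keys():
--         num_reps_1 = dict1[s]
--         num_reps_2 = 0
--         if s in dict2.keys():
--             num_reps_2 = dict2[s]
--         total += abs(num_reps_1 - num_reps_2)
--         used_variables.append(s)
--
--     for s in dict2.keys():
--         if s not in used_variables:
--             total += dict2[s]
--
--     return total
-- ===== SOURCE B (Python) =====
-- def sum_dif_dict(dict1, dict2):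
--     # Algebraic reformulation: the "extra keys of dict2" term equals
--     # sum(dict2.values()) minus dict2's values at dict1's keys, so no
--     # key-membership test or key-set construction is needed at all.
--     total = sum(dict2.values())
--     for k, v in dict1.items():
--         w = dict2.get(k, 0)
--         total += abs(v - w) - w
--     return total
-- ===== Notes on version B (the rewrite author's own statement) =====
-- stated objective: faster
-- what changed: Replaces A's two loops with their key-membership tests and the growing used_variables list by an algebraic reformulation: start from sum(dict2.values()) and make one uniform pass over dict1 adding abs(v - dict2.get(k,0)) - dict2.get(k,0), so the 'keys only in dict2' term and every membership test disappear; Pre_ excludes association lists with duplicate keys, which do not represent a Python dict.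
import Mathlib
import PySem

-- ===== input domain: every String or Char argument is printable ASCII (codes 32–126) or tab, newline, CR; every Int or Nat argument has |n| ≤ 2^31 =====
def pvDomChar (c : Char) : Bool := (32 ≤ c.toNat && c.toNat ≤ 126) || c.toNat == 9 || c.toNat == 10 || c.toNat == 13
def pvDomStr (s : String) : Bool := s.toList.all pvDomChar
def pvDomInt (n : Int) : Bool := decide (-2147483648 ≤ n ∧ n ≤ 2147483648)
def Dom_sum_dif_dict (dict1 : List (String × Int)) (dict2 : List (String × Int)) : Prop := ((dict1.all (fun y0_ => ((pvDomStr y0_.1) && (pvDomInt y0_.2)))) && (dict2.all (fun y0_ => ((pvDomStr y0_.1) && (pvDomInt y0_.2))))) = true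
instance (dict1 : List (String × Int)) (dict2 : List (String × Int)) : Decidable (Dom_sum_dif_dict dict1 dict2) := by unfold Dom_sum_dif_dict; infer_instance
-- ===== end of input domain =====

-- B removes A's second loop, membership tests and used_variables list by an algebraic
-- reformulation (values-sum of dict2 plus one uniform pass over dict1); return value only.

-- ===== PORT A =====
-- dict lookup with default 0 (first match in the association list)
def pvGet0 (d : List (String × Int)) (s : String) : Int :=
  match List.lookup s d with
  | some v => v
  | none => 0

def sum_dif_dict (dict1 : List (String × Int)) (dict2 : List (String × Int)) : Int :=
  -- first loop: over dict1.keys(), accumulating (used_variables, total)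
  let r := dict1.foldl
    (fun (st : List String × Int) kv =>
      let s := kv.1
      let num_reps_1 := pvGet0 dict1 s
      let num_reps_2 := if (dict2.map Prod.fst).contains s then pvGet0 dict2 s else 0
      (st.1 ++ [s], st.2 + |num_reps_1 - num_reps_2|))
    ([], 0)
  -- second loop: over dict2.keys()
  dict2.foldl
    (fun total kv => if r.1.contains kv.1 then total else total + pvGet0 dict2 kv.1)
    r.2

-- ===== PORT B =====
def sum_dif_dict_alt (dict1 : List (String × Int)) (dict2 : List (String × Int)) : Int :=
  -- total = sum(dict2.values()); then one pass over dict1.items()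
  dict1.foldl
    (fun total kv =>
      let w := pvGet0 dict2 kv.1
      total + (|kv.2 - w| - w))
    ((dict2.map Prod.snd).sum)

-- ===== PRECONDITION & SPEC =====
-- Pre_ excludes association lists with duplicate keys: a Python dict cannot contain them,
-- so such lists do not represent any input A is ever run on.
def Pre_sum_dif_dict (dict1 : List (String × Int)) (dict2 : List (String × Int)) : Prop :=
  (dict1.map Prod.fst).Nodup ∧ (dict2.map Prod.fst).Nodup
instance (dict1 : List (String × Int)) (dict2 : List (String × Int)) : Decidable (Pre_sum_dif_dict dict1 dict2) := by unfold Pre_sum_dif_dict; infer_instance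

def pvWitness_sum_dif_dict : (List (String × Int)) × (List (String × Int)) :=
  ([("a", 3), ("b", -2)], [("b", 5), ("c", -1)])

def Spec_sum_dif_dict (dict1 : List (String × Int)) (dict2 : List (String × Int)) (out : Int) : Prop := out = sum_dif_dict_alt dict1 dict2
instance (dict1 : List (String × Int)) (dict2 : List (String × Int)) (out : Int) : Decidable (Spec_sum_dif_dict dict1 dict2 out) := by unfold Spec_sum_dif_dict; infer_instance

-- ===== CLAIM (what is proved, stated in full; the proofs are below) =====
def Claim_equal_sum_dif_dict : Prop := ∀ (dict1 : List (String × Int)) (dict2 : List (String × Int)), Dom_sum_dif_dict dict1 dict2 → Pre_sum_dif_dict dict1 dict2 → Spec_sum_dif_dict dict1 dict2 (sum_dif_dict dict1 dict2)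

-- ===== LEMMAS AND PROOFS =====

-- In a duplicate-free association list, looking up an entry's own key returns its value.
theorem pvGet0_self {d : List (String × Int)} (hnd : (d.map Prod.fst).Nodup)
    {kv : String × Int} (h : kv ∈ d) : pvGet0 d kv.1 = kv.2 := by
  induction d with
  | nil => cases h
  | cons hd tl ih =>
    simp only [List.map_cons, List.nodup_cons] at hnd
    rcases List.mem_cons.mp h with h | h
    · subst h
      simp [pvGet0, List.lookup]
    · have hne : hd.1 ≠ kv.1 := by
        intro he
        exact hnd.1 (he ▸ (List.mem_map.mpr ⟨kv, h, rfl⟩))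
      have : (kv.1 == hd.1) = false := by
        simp [beq_eq_false_iff_ne]; exact fun he => hne he.symm
      simpa [pvGet0, List.lookup, this] using ih hnd.2 h

-- The "if s in dict2 then dict2[s] else 0" of A is just lookup-with-default.
theorem pvGet0_if (d : List (String × Int)) (s : String) :
    (if (d.map Prod.fst).contains s then pvGet0 d s else 0) = pvGet0 d s := by
  split_ifs with h
  · rfl
  · simp only [List.contains_eq_mem, decide_eq_true_eq] at h
    have : List.lookup s d = none := by
      cases hl : List.lookup s d with
      | none => rfl
      | some v =>
        have hm : (s, v) ∈ d := by
          clear h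
          induction d with
          | nil => simp [List.lookup] at hl
          | cons hd tl ih =>
            by_cases he : s == hd.1
            · have hs : s = hd.1 := by simpa using he
              simp [List.lookup, he] at hl
              have hhd : hd = (s, v) := by rw [hs, ← hl]
              rw [hhd]
              exact List.mem_cons_self
            · simp only [List.lookup, he] at hl
              exact List.mem_cons_of_mem _ (ih hl)
        exact absurd (List.mem_map.mpr ⟨(s, v), hm, rfl⟩) h
    simp [pvGet0, this]

-- fold of A's first loop = (used ++ keys, total + Σ |v - get0 dict2 k|).
theorem loopA_first (dict1 dict2 : List (String × Int)) (l : List (String × Int))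
    (hl : ∀ kv ∈ l, pvGet0 dict1 kv.1 = kv.2) (used : List String) (total : Int) :
    l.foldl
      (fun (st : List String × Int) kv =>
        (st.1 ++ [kv.1], st.2 + |pvGet0 dict1 kv.1 -
          (if (dict2.map Prod.fst).contains kv.1 then pvGet0 dict2 kv.1 else 0)|))
      (used, total)
    = (used ++ l.map Prod.fst,
       total + (l.map (fun kv => |kv.2 - pvGet0 dict2 kv.1|)).sum) := by
  induction l generalizing used total with
  | nil => simp
  | cons hd tl ih =>
    simp only [List.foldl_cons]
    rw [ih (fun kv h => hl kv (List.mem_cons_of_mem _ h))]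
    rw [hl hd (List.mem_cons_self), pvGet0_if]
    simp [add_assoc]

-- fold of A's second loop = total + sum of values of the non-filtered entries.
theorem loopA_second (dict2 : List (String × Int)) (keys1 : List String)
    (l : List (String × Int)) (hl : ∀ kv ∈ l, pvGet0 dict2 kv.1 = kv.2) (total : Int) :
    l.foldl
      (fun t kv => if keys1.contains kv.1 then t else t + pvGet0 dict2 kv.1) total
    = total + ((l.filter (fun kv => !keys1.contains kv.1)).map Prod.snd).sum := by
  induction l generalizing total with
  | nil => simp
  | cons hd tl ih =>
    simp only [List.foldl_cons, List.filter_cons]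
    by_cases h : keys1.contains hd.1
    · simp only [h, if_pos, Bool.not_true]
      rw [ih (fun kv hm => hl kv (List.mem_cons_of_mem _ hm))]
      simp
    · simp only [h, Bool.not_false]
      rw [ih (fun kv hm => hl kv (List.mem_cons_of_mem _ hm))]
      rw [hl hd (List.mem_cons_self)]
      simp [add_assoc]

-- fold of B's loop = start + Σ (|v - get0 dict2 k| - get0 dict2 k).
theorem loopB (dict2 : List (String × Int)) (l : List (String × Int)) (start : Int) :
    l.foldl (fun total kv => total + (|kv.2 - pvGet0 dict2 kv.1| - pvGet0 dict2 kv.1)) start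
    = start + (l.map (fun kv => |kv.2 - pvGet0 dict2 kv.1| - pvGet0 dict2 kv.1)).sum := by
  induction l generalizing start with
  | nil => simp
  | cons hd tl ih => simp [ih, add_assoc]

-- Splitting a sum of mapped values over a filter and its complement.
theorem sum_filter_split (l : List (String × Int)) (p : (String × Int) → Bool) :
    ((l.filter p).map Prod.snd).sum + ((l.filter (fun kv => !p kv)).map Prod.snd).sum
    = (l.map Prod.snd).sum := by
  induction l with
  | nil => simp
  | cons hd tl ih =>
    by_cases h : p hd <;> simp [h, ← ih] <;> ring

-- A sum over a filter by a disjunction of pointwise-exclusive predicates splits.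
theorem sum_filter_or (l : List (String × Int)) (p q : (String × Int) → Bool)
    (h : ∀ kv ∈ l, p kv = true → q kv = false) :
    ((l.filter (fun kv => p kv || q kv)).map Prod.snd).sum
    = ((l.filter p).map Prod.snd).sum + ((l.filter q).map Prod.snd).sum := by
  induction l with
  | nil => simp
  | cons hd tl ih =>
    have ih' := ih (fun kv hm => h kv (List.mem_cons_of_mem _ hm))
    by_cases hp : p hd
    · have hq := h hd List.mem_cons_self hp
      simp [hp, hq, ih', add_assoc]
    · by_cases hq : q hd <;> simp [hp, hq, ih'] <;> ring_nf
  
-- If s is not among l's keys, filtering l for key s yields nothing.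
theorem filter_key_not_mem (l : List (String × Int)) (s : String)
    (h : s ∉ l.map Prod.fst) : l.filter (fun kv => kv.1 == s) = [] := by
  induction l with
  | nil => rfl
  | cons hd tl ih =>
    simp only [List.map_cons, List.mem_cons, not_or] at h
    have : (hd.1 == s) = false := by simp [beq_eq_false_iff_ne]; exact fun he => h.1 he.symm
    simp [this, ih h.2]

-- In a duplicate-free list, the values at key s sum to the lookup-with-default.
theorem sum_filter_single (l : List (String × Int)) (hnd : (l.map Prod.fst).Nodup)
    (s : String) :
    ((l.filter (fun kv => kv.1 == s)).map Prod.snd).sum = pvGet0 l s := by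
  induction l with
  | nil => simp [pvGet0, List.lookup]
  | cons hd tl ih =>
    simp only [List.map_cons, List.nodup_cons] at hnd
    by_cases he : hd.1 = s
    · subst he
      simp [filter_key_not_mem tl hd.1 hnd.1, pvGet0, List.lookup]
    · have h1 : (hd.1 == s) = false := by simp [beq_eq_false_iff_ne, he]
      have h2 : (s == hd.1) = false := by
        simp [beq_eq_false_iff_ne]; exact fun x => he x.symm
      simp [h1, pvGet0, List.lookup, h2, ih hnd.2]

-- Key identity: dict2's values at dict1's keys, taken from dict2's side (a filter)
-- or from dict1's side (a map of lookups), sum to the same number.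
theorem sum_filter_contains (d1 d2 : List (String × Int))
    (h1 : (d1.map Prod.fst).Nodup) (h2 : (d2.map Prod.fst).Nodup) :
    ((d2.filter (fun kv => (d1.map Prod.fst).contains kv.1)).map Prod.snd).sum
    = (d1.map (fun kv => pvGet0 d2 kv.1)).sum := by
  induction d1 with
  | nil =>
    simp
  | cons hd tl ih =>
    simp only [List.map_cons, List.nodup_cons] at h1
    have hcong : d2.filter (fun kv => ((hd.1 :: tl.map Prod.fst).contains kv.1))
        = d2.filter (fun kv => (kv.1 == hd.1) || (tl.map Prod.fst).contains kv.1) := by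
      apply List.filter_congr
      intro kv _
      simp
    have hexcl : ∀ kv ∈ d2, (kv.1 == hd.1) = true → ((tl.map Prod.fst).contains kv.1) = false := by
      intro kv _ hk
      have : kv.1 = hd.1 := by simpa using hk
      rw [this]
      simpa using h1.1
    rw [List.map_cons, hcong, sum_filter_or d2 _ _ hexcl,
        sum_filter_single d2 h2 hd.1, ih h1.2]
    simp

-- Sum of a map of differences splits.
theorem sum_map_sub (l : List (String × Int)) (d2 : List (String × Int)) :
    (l.map (fun kv => |kv.2 - pvGet0 d2 kv.1| - pvGet0 d2 kv.1)).sum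
    = (l.map (fun kv => |kv.2 - pvGet0 d2 kv.1|)).sum
      - (l.map (fun kv => pvGet0 d2 kv.1)).sum := by
  induction l with
  | nil => simp
  | cons hd tl ih => simp only [List.map_cons, List.sum_cons, ih]; ring

-- ===== VERDICT (by name: the statement is the Claim_ definition above) =====
theorem sum_dif_dict_spec : Claim_equal_sum_dif_dict := by
  intro dict1 dict2 _ hpre
  rcases hpre with ⟨h1, h2⟩
  unfold Spec_sum_dif_dict sum_dif_dict sum_dif_dict_alt
  rw [loopA_first dict1 dict2 dict1 (fun kv h => pvGet0_self h1 h) [] 0]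
  rw [loopA_second dict2 (([] : List String) ++ dict1.map Prod.fst) dict2
        (fun kv h => pvGet0_self h2 h)]
  rw [loopB]
  simp only [List.nil_append, zero_add]
  have hsplit := sum_filter_split dict2 (fun kv => (dict1.map Prod.fst).contains kv.1)
  have hkey := sum_filter_contains dict1 dict2 h1 h2
  rw [sum_map_sub dict1 dict2, ← hkey]
  omega
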